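-- pv_equiv track=rewrite | github.com/zhimamao/zhimamao.github.io | tags/maschine learning/ubung/ubung9/aufgabe2.py | julei
-- ===== SOURCE A (Python) =====
-- def julei(ds,x):
--     x = x
--     x = len(x)
--     i = 0
--     temp = []
--     while i < x:
--         temp.append(ds[i].index(min(ds[i])))
--         i = i + 1
--     return(temp)
-- ===== SOURCE B (Python) =====
-- def julei(ds, x):
--     # stable-sort each row's index list by value; the head is then the first
--     # index of the minimum (stability breaks ties toward the smaller index)
--     return [sorted(range(len(ds[i])), key=ds[i].__getitem__)[0] for i in range(len(x))]
-- ===== Notes on version B (the rewrite author's own statement) =====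
-- stated objective: alternative
-- what changed: B computes each row's argmin by stable-sorting the row's index list by value and taking the head (stability makes the first index of the minimum come first), instead of A's while-counter loop that scans each row twice via min() and then .index(); it trades linear scans for a sort that makes the tie-breaking explicit.
import Mathlib
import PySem

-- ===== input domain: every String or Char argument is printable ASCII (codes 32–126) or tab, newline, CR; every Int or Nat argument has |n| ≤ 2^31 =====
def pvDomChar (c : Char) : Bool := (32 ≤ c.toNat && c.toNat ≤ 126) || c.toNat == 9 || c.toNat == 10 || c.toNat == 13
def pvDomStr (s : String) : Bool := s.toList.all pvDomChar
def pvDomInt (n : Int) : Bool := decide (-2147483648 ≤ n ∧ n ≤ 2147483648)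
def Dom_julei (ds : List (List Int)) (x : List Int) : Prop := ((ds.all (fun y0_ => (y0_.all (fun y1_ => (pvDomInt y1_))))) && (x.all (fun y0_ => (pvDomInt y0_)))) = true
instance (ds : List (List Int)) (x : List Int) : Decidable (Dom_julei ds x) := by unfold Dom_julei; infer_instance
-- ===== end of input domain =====

-- B stable-sorts each row's index list by value and takes the head (first index of the minimum), instead of A's min() + .index() double scan per row; equal return value on Pre_.


-- ===== PORT A =====
-- one iteration of A's while loop: temp.append(ds[i].index(min(ds[i])));
-- the 'none' branches are Python's IndexError/ValueError, excluded by Pre_julei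
def juleiStep (ds : List (List Int)) (temp : List Int) (i : Int) : List Int :=
  match PySem.List.pyGet? ds i with
  | none => temp
  | some row =>
    match PySem.List.min? row (fun y => y) with
    | none => temp
    | some m =>
      match PySem.List.index? row m with
      | none => temp
      | some j => temp ++ [(j : Int)]

def julei (ds : List (List Int)) (x : List Int) : List Int :=
  (PySem.List.pyRange 0 (x.length : Int)).foldl (juleiStep ds) []

-- ===== PORT B =====
-- key=ds[i].__getitem__; exact for the indices 0..len(row)-1 that range() supplies (all in range)
def rowKey (row : List Int) (j : Int) : Int := PySem.List.pyGetD row j 0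

-- sorted(range(len(row)), key=row.__getitem__)[0]; the [] branch is Python's
-- IndexError of [0] on an empty row, excluded by Pre_julei
def argminSorted (row : List Int) : Int :=
  match PySem.List.sorted (PySem.List.pyRange 0 (row.length : Int)) (rowKey row) with
  | [] => 0
  | m :: _ => m

def julei_alt (ds : List (List Int)) (x : List Int) : List Int :=
  (PySem.List.pyRange 0 (x.length : Int)).map (fun i =>
    match PySem.List.pyGet? ds i with
    | none => 0            -- IndexError in Python, excluded by Pre_julei
    | some row => argminSorted row)

-- ===== PRECONDITION & SPEC =====
-- exactly the inputs on which A returns: enough rows, and each visited row nonempty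
def Pre_julei (ds : List (List Int)) (x : List Int) : Prop :=
  x.length ≤ ds.length ∧ ∀ row ∈ ds.take x.length, row ≠ []
instance (ds : List (List Int)) (x : List Int) : Decidable (Pre_julei ds x) := by
  unfold Pre_julei; infer_instance

def pvWitness_julei : List (List Int) × List Int := ([[3, 1, 2], [5, 5]], [7, 8])

def Spec_julei (ds : List (List Int)) (x : List Int) (out : List Int) : Prop := out = julei_alt ds x
instance (ds : List (List Int)) (x : List Int) (out : List Int) : Decidable (Spec_julei ds x out) := by unfold Spec_julei; infer_instance

-- ===== CLAIM (what is proved, stated in full; the proofs are below) =====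
def Claim_equal_julei : Prop := ∀ (ds : List (List Int)) (x : List Int), Dom_julei ds x → Pre_julei ds x → Spec_julei ds x (julei ds x)

-- ===== LEMMAS AND PROOFS =====

-- first index of v in a list (defined value when v ∈ xs)
def fio (v : Int) : List Int → Nat
  | [] => 0
  | a :: t => if a = v then 0 else fio v t + 1

theorem index?_eq_fio (v : Int) (xs : List Int) (hv : v ∈ xs) :
    PySem.List.index? xs v = some (fio v xs) := by
  induction xs with
  | nil => cases hv
  | cons a t ih =>
    by_cases hav : a = v
    · subst hav; rw [PySem.List.index?_cons_self]; simp [fio]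
    · have hvm : v ∈ t := by cases hv with
        | head => exact absurd rfl hav
        | tail _ h => exact h
      rw [PySem.List.index?_cons_of_ne t hav, ih hvm]
      simp [fio, hav]

-- the common reference value both ports are reduced to: first-argmin accumulator
def argminLoop : List Int → Int → Int → Int → Int
  | [], _, bi, _ => bi
  | a :: t, j, bi, bv =>
    if a < bv then argminLoop t (j + 1) j a else argminLoop t (j + 1) bi bv

def argminRow : List Int → Int
  | [] => 0
  | h :: t => argminLoop t 1 0 h

theorem argminLoop_eq (t : List Int) : ∀ (bv bi j : Int),
    argminLoop t j bi bv =
      if t.foldl min bv < bv then j + ((fio (t.foldl min bv) t : Nat) : Int) else bi := by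
  induction t with
  | nil => intro bv bi j; simp [argminLoop]
  | cons a t ih =>
    intro bv bi j
    have hfold : (a :: t).foldl min bv = t.foldl min (min bv a) := rfl
    by_cases hab : a < bv
    · have hmin : min bv a = a := min_eq_right (le_of_lt hab)
      have hle : t.foldl min a ≤ a := (PySem.List.foldl_min_le t a).1
      simp only [argminLoop, if_pos hab, ih a j (j + 1), hfold, hmin]
      by_cases hs : t.foldl min a < a
      · have hcond : t.foldl min a < bv := lt_trans hs hab
        have hne : ¬ a = t.foldl min a := by omega
        rw [if_pos hs, if_pos hcond]
        simp [fio, hne]; ring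
      · have heq : t.foldl min a = a := le_antisymm hle (by omega)
        rw [if_neg hs, if_pos (by omega : t.foldl min a < bv)]
        simp [fio, heq]
    · have hmin : min bv a = bv := min_eq_left (by omega)
      simp only [argminLoop, if_neg hab, ih bv bi (j + 1), hfold, hmin]
      by_cases hs : t.foldl min bv < bv
      · have hne : ¬ a = t.foldl min bv := by omega
        rw [if_pos hs, if_pos hs]
        simp [fio, hne]; ring
      · rw [if_neg hs, if_neg hs]

-- A's per-row value is argminRow
theorem step_cons (ds : List (List Int)) (acc : List Int) (i : Int) (h : Int) (t : List Int)
    (hget : PySem.List.pyGet? ds i = some (h :: t)) :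
    juleiStep ds acc i = acc ++ [argminRow (h :: t)] := by
  have hle : t.foldl min h ≤ h := (PySem.List.foldl_min_le t h).1
  have hmem : t.foldl min h ∈ h :: t := by
    rcases PySem.List.foldl_min_mem t h with he | hm
    · rw [he]; exact List.mem_cons_self
    · exact List.mem_cons_of_mem _ hm
  unfold juleiStep
  rw [hget]
  dsimp only
  rw [PySem.List.min?_id_cons]
  dsimp only
  rw [index?_eq_fio _ _ hmem]
  dsimp only
  show acc ++ [((fio (t.foldl min h) (h :: t) : Nat) : Int)] = acc ++ [argminRow (h :: t)]
  have hB : argminRow (h :: t) =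
      if t.foldl min h < h then 1 + ((fio (t.foldl min h) t : Nat) : Int) else 0 :=
    argminLoop_eq t h 0 1
  by_cases hs : t.foldl min h < h
  · have hne : ¬ h = t.foldl min h := by omega
    rw [hB, if_pos hs]
    simp [fio, hne]; ring
  · have heq : h = t.foldl min h := by omega
    rw [hB, if_neg hs]
    simp [fio, ← heq]

theorem julei_main (n : Nat) : ∀ (ds : List (List Int)) (acc : List Int),
    n ≤ ds.length → (∀ row ∈ ds.take n, row ≠ []) →
    (PySem.List.pyRange 0 (n : Int)).foldl (juleiStep ds) acc = acc ++ (ds.take n).map argminRow := by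
  induction n with
  | zero => intro ds acc _ _; simp [PySem.List.pyRange]
  | succ n ih =>
    intro ds acc hlen hrows
    have hn : n < ds.length := by omega
    have hcast : ((n + 1 : Nat) : Int) = (n : Int) + 1 := by push_cast; ring
    rw [hcast, PySem.List.pyRange_one_succ_right (by positivity), List.foldl_append]
    have hrows' : ∀ row ∈ ds.take n, row ≠ [] := fun row hr =>
      hrows row (by rw [List.take_add_one]; exact List.mem_append_left _ hr)
    rw [ih ds acc (by omega) hrows']
    have hgetmem : ds[n] ∈ ds.take (n + 1) := by
      rw [List.mem_take_iff_getElem]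
      exact ⟨n, by omega, by simp⟩
    have hne : ds[n] ≠ [] := hrows _ hgetmem
    have hget : PySem.List.pyGet? ds ((n : Nat) : Int) = some ds[n] := by
      rw [PySem.List.pyGet?_natCast]; simp [hn]
    cases hrow : ds[n] with
    | nil => exact absurd hrow hne
    | cons h t =>
      rw [List.foldl_cons, List.foldl_nil]
      rw [step_cons ds _ (n : Int) h t (by rw [hget, hrow])]
      rw [List.take_add_one, List.map_append, ← List.append_assoc]
      congr 1
      simp [hn, hrow]

-- ---- B side: head of the stable sort is the first-argmin accumulator ----

-- inserting into a nonempty sorted list: the new head is the key-smaller of x and the old head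
theorem insertBy_head (key : Int → Int) (x h : Int) (t : List Int) :
    ∃ t', PySem.List.insertBy (fun a b => decide (key a < key b)) x (h :: t) =
      (if key x < key h then x else h) :: t' := by
  by_cases hxh : key x < key h
  · exact ⟨h :: t, by simp [PySem.List.insertBy, hxh]⟩
  · exact ⟨PySem.List.insertBy (fun a b => decide (key a < key b)) x t,
      by simp [PySem.List.insertBy, hxh]⟩

theorem foldl_insertBy_head (key : Int → Int) (xs : List Int) : ∀ (h : Int) (rest : List Int),
    ∃ rest', xs.foldl (fun acc x => PySem.List.insertBy (fun a b => decide (key a < key b)) x acc) (h :: rest)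
      = (xs.foldl (fun m j => if key j < key m then j else m) h) :: rest' := by
  induction xs with
  | nil => intro h rest; exact ⟨rest, rfl⟩
  | cons a t ih =>
    intro h rest
    obtain ⟨t', ht'⟩ := insertBy_head key a h rest
    rw [List.foldl_cons, ht']
    obtain ⟨rest', hr⟩ := ih (if key a < key h then a else h) t'
    exact ⟨rest', by rw [hr, List.foldl_cons]⟩

-- folding the key comparison over the remaining indices is argminLoop on the suffix
theorem idxfold_eq_argminLoop (row : List Int) : ∀ (t : List Int) (j : Nat) (bi bv : Int),
    row.drop j = t → rowKey row bi = bv →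
    (PySem.List.pyRange (j : Int) (row.length : Int)).foldl
        (fun m i => if rowKey row i < rowKey row m then i else m) bi
      = argminLoop t (j : Int) bi bv := by
  intro t
  induction t with
  | nil =>
    intro j bi bv hdrop _
    have hj : row.length ≤ j := by
      by_contra hlt
      have : row.drop j ≠ [] := by
        simp [List.drop_eq_nil_iff]; omega
      exact this hdrop
    have hle : (row.length : Int) ≤ (j : Int) := by exact_mod_cast hj
    have : PySem.List.pyRange (j : Int) (row.length : Int) = [] := by
      rw [List.eq_nil_iff_forall_not_mem]
      intro y hy
      rw [PySem.List.mem_pyRange_one] at hy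
      omega
    rw [this]; rfl
  | cons a t ih =>
    intro j bi bv hdrop hbv
    have hj : j < row.length := by
      by_contra hge
      rw [List.drop_eq_nil_of_le (by omega)] at hdrop
      exact absurd hdrop (by simp)
    have hja : rowKey row (j : Int) = a := by
      have hget : row[j] = a := by
        have hd := List.drop_eq_getElem_cons hj
        rw [hd] at hdrop
        exact (List.cons_eq_cons.mp hdrop).1
      unfold rowKey
      rw [PySem.List.pyGetD_natCast, List.getD_eq_getElem _ _ hj, hget]
    have hdrop' : row.drop (j + 1) = t := by
      have := congrArg (List.drop 1) hdrop
      simpa [List.drop_drop, Nat.add_comm] using this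
    have hcons : PySem.List.pyRange (j : Int) (row.length : Int)
        = (j : Int) :: PySem.List.pyRange ((j : Int) + 1) (row.length : Int) := by
      exact PySem.List.pyRange_one_cons (by exact_mod_cast hj)
    rw [hcons, List.foldl_cons, hja, hbv]
    have hc : ((j : Int) + 1) = ((j + 1 : Nat) : Int) := by push_cast; ring
    by_cases hab : a < bv
    · rw [if_pos hab, hc, ih (j + 1) (j : Int) a hdrop' hja]
      simp only [argminLoop]
      rw [if_pos hab, ← hc]
    · rw [if_neg hab, hc, ih (j + 1) bi bv hdrop' hbv]
      simp only [argminLoop]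
      rw [if_neg hab, ← hc]

-- B's per-row value is argminRow too
theorem argminSorted_eq (h : Int) (t : List Int) :
    argminSorted (h :: t) = argminRow (h :: t) := by
  unfold argminSorted
  rw [PySem.List.sorted_eq_foldl_insertBy]
  have hlen : (0 : Int) < ((h :: t).length : Int) := by simp
  rw [PySem.List.pyRange_one_cons hlen, List.foldl_cons]
  have h0 : PySem.List.insertBy (fun a b => decide (rowKey (h :: t) a < rowKey (h :: t) b)) 0 []
      = [0] := by simp [PySem.List.insertBy]
  rw [h0]
  obtain ⟨rest', hr⟩ := foldl_insertBy_head (rowKey (h :: t))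
    (PySem.List.pyRange ((0 : Int) + 1) (((h :: t).length : Int))) 0 []
  rw [hr]
  dsimp only
  have hkey0 : rowKey (h :: t) 0 = h := by
    unfold rowKey
    have : ((0 : Nat) : Int) = (0 : Int) := by norm_num
    rw [← this, PySem.List.pyGetD_natCast]; rfl
  have h1 : ((0 : Int) + 1) = ((1 : Nat) : Int) := by norm_num
  have := idxfold_eq_argminLoop (h :: t) t 1 0 h (by simp) hkey0
  rw [h1, this]
  rfl

-- assemble julei_alt: the comprehension over range(len(x)) is argminRow over the rows it visits
theorem julei_alt_eq (ds : List (List Int)) (x : List Int)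
    (hlen : x.length ≤ ds.length) (hrows : ∀ row ∈ ds.take x.length, row ≠ []) :
    julei_alt ds x = (ds.take x.length).map argminRow := by
  unfold julei_alt
  rw [PySem.List.pyRange_zero_natCast, List.map_map]
  apply List.ext_getElem
  · simp [hlen]
  · intro i hi₁ hi₂
    have hin : i < x.length := by simpa using hi₁
    have hid : i < ds.length := by omega
    have hget : PySem.List.pyGet? ds ((i : Nat) : Int) = some ds[i] := by
      rw [PySem.List.pyGet?_natCast]; simp [hid]
    have hne : ds[i] ≠ [] := hrows _ (by
      rw [List.mem_take_iff_getElem]; exact ⟨i, by omega, by simp⟩)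
    simp only [List.getElem_map, List.getElem_range, Function.comp]
    rw [hget]
    cases hrow : ds[i] with
    | nil => exact absurd hrow hne
    | cons h t =>
      simp only [List.getElem_take]
      rw [hrow, argminSorted_eq]

-- ===== VERDICT (by name: the statement is the Claim_ definition above) =====
theorem julei_spec : Claim_equal_julei := by
  intro ds x _ hpre
  unfold Spec_julei julei
  rw [julei_main x.length ds [] hpre.1 hpre.2, julei_alt_eq ds x hpre.1 hpre.2]
  rfl
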